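-- pv_equiv track=rewrite | github.com/sherrysarkar/Positions | GrundyValuesFibNim.py | fibnim
-- ===== SOURCE A (Python) =====
-- def fibnim(n):
--     gvalues = [[0]]
--     for i in range(1,n+1):
--         gvalues.append([0])
--         for j in range(1,i+1):
--             S = [gvalues[i-k][min(2*k,i-k)] for k in range(1,j+1)]
--             gvalues[i].append(mex(S))
--     return gvalues
--
-- def mex(S):
--     i = 0
--     while True:
--         if i not in S:
--             return i
--         i = i+1
-- ===== SOURCE B (Python) =====
-- def fibnim(n):
--     gvalues = [[0]]
--     for i in range(1, n + 1):
--         # the mex argument for column j is a prefix of the one for column j+1,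
--         # so maintain a membership set and a monotone mex pointer across the row
--         row = [0]
--         seen = set()
--         m = 0
--         for k in range(1, i + 1):
--             seen.add(gvalues[i - k][min(2 * k, i - k)])
--             while m in seen:
--                 m += 1
--             row.append(m)
--         gvalues.append(row)
--     return gvalues
-- ===== Notes on version B (the rewrite author's own statement) =====
-- stated objective: faster
-- what changed: Instead of rebuilding the whole list S and rescanning it from 0 inside mex for every column j, B maintains a membership set and a monotone mex pointer that advance incrementally across the row (S for column j is a prefix of S for column j+1).
import Mathlib
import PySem

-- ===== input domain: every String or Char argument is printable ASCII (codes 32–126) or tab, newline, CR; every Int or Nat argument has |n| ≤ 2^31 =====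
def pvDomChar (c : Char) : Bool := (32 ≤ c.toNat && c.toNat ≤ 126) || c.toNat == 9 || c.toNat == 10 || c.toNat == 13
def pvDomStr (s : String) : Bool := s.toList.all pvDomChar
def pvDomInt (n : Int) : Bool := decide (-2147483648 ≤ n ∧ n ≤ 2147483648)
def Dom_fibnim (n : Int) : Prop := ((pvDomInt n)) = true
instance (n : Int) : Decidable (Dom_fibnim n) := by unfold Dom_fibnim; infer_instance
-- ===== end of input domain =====

-- B replaces A's per-column rebuild of the list S and from-0 rescan in mex by a membership set
-- and a monotone mex pointer maintained incrementally across the row.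

-- ===== PORT A =====
-- A's mex: while loop scanning i = 0,1,2,…; fuel S.length+1 suffices (pigeonhole, proved below),
-- so the fuel-exhaustion branch is unreachable.
def pvMexAux (S : List Int) : Nat → Int → Int
  | 0, i => i
  | fuel+1, i => if i ∈ S then pvMexAux S fuel (i+1) else i

def pvMex (S : List Int) : Int := pvMexAux S (S.length + 1) 0

-- inner loop of A: for each j rebuild S from scratch and append mex(S); it reads only rows < i
def pvRowA (gvalues : List (List Int)) (i : Int) : List Int :=
  (PySem.List.pyRange 1 (i+1) 1).foldl (fun row j =>
    row ++ [pvMex ((PySem.List.pyRange 1 (j+1) 1).map (fun k =>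
      PySem.List.pyGetD (PySem.List.pyGetD gvalues (i-k) []) (min (2*k) (i-k)) 0))]) [0]

def fibnim (n : Int) : List (List Int) :=
  (PySem.List.pyRange 1 (n+1) 1).foldl (fun gvalues i => gvalues ++ [pvRowA gvalues i]) [[0]]

-- ===== PORT B =====
-- B's while loop: advance m while m ∈ seen; fuel seen.length+1 suffices (pigeonhole, proved below)
def pvAdvance (seen : PySem.Set Int) : Nat → Int → Int
  | 0, m => m
  | fuel+1, m => if m ∈ seen then pvAdvance seen fuel (m+1) else m

-- inner loop of B: state (seen, m, row); add one value, advance the mex pointer, append it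
def pvStepB (gvalues : List (List Int)) (i : Int)
    (st : PySem.Set Int × Int × List Int) (k : Int) : PySem.Set Int × Int × List Int :=
  let seen := PySem.Set.add st.1
    (PySem.List.pyGetD (PySem.List.pyGetD gvalues (i-k) []) (min (2*k) (i-k)) 0)
  let m := pvAdvance seen (seen.length + 1) st.2.1
  (seen, m, st.2.2 ++ [m])

def pvRowB (gvalues : List (List Int)) (i : Int) : List Int :=
  ((PySem.List.pyRange 1 (i+1) 1).foldl (pvStepB gvalues i) (PySem.Set.empty, 0, [0])).2.2

def fibnim_alt (n : Int) : List (List Int) :=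
  (PySem.List.pyRange 1 (n+1) 1).foldl (fun gvalues i => gvalues ++ [pvRowB gvalues i]) [[0]]

-- ===== PRECONDITION & SPEC =====
def Spec_fibnim (n : Int) (out : List (List Int)) : Prop := out = fibnim_alt n
instance (n : Int) (out : List (List Int)) : Decidable (Spec_fibnim n out) := by unfold Spec_fibnim; infer_instance

-- ===== CLAIM (what is proved, stated in full; the proofs are below) =====
def Claim_equal_fibnim : Prop := ∀ (n : Int), Dom_fibnim n → Spec_fibnim n (fibnim n)

-- ===== LEMMAS AND PROOFS =====

-- pigeonhole: among i, i+1, …, i+|S| some value is not in S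
theorem pvPigeon (S : List Int) (i : Int) : ∃ j : Nat, j ≤ S.length ∧ (i + j : Int) ∉ S := by
  by_contra h
  push Not at h
  have hsub : ((List.range (S.length + 1)).map (fun j : Nat => i + (j : Int))).toFinset ⊆ S.toFinset := by
    intro x hx
    simp only [List.mem_toFinset, List.mem_map, List.mem_range] at hx ⊢
    obtain ⟨j, hj, rfl⟩ := hx
    exact h j (by omega)
  have hnodup : ((List.range (S.length + 1)).map (fun j : Nat => i + (j : Int))).Nodup := by
    refine List.Nodup.map ?_ List.nodup_range
    intro a b hab
    have hab' : i + (a : Int) = i + (b : Int) := hab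
    omega
  have hcard := Finset.card_le_card hsub
  rw [List.toFinset_card_of_nodup hnodup] at hcard
  simp only [List.length_map, List.length_range] at hcard
  have := S.toFinset_card_le
  omega

theorem pvGap (S : List Int) (i : Int) : ∃ j : Nat, (i + j : Int) ∉ S :=
  (pvPigeon S i).elim (fun j hj => ⟨j, hj.2⟩)

-- the least t ≥ i with t ∉ S
def pvLeast (S : List Int) (i : Int) : Int := i + (Nat.find (pvGap S i) : Int)

theorem pvGap_bounded (S : List Int) (i : Int) : Nat.find (pvGap S i) ≤ S.length := by
  obtain ⟨j, hj, hmem⟩ := pvPigeon S i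
  exact le_trans (Nat.find_min' _ hmem) hj

theorem pvLeast_nonneg (S : List Int) : 0 ≤ pvLeast S 0 := by
  unfold pvLeast
  omega

theorem pvLeast_congr (S T : List Int) (i : Int) (h : ∀ x, x ∈ S ↔ x ∈ T) :
    pvLeast S i = pvLeast T i := by
  have h1 : Nat.find (pvGap S i) ≤ Nat.find (pvGap T i) :=
    Nat.find_min' _ (fun hm => (Nat.find_spec (pvGap T i)) ((h _).mp hm))
  have h2 : Nat.find (pvGap T i) ≤ Nat.find (pvGap S i) :=
    Nat.find_min' _ (fun hm => (Nat.find_spec (pvGap S i)) ((h _).mpr hm))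
  unfold pvLeast
  rw [le_antisymm h1 h2]

theorem pvLeast_of_not_mem (S : List Int) (i : Int) (h : i ∉ S) : pvLeast S i = i := by
  unfold pvLeast
  have : Nat.find (pvGap S i) = 0 := (Nat.find_eq_zero _).mpr (by simpa using h)
  rw [this]
  simp

theorem pvFind_of_mem (S : List Int) (i : Int) (h : i ∈ S) :
    Nat.find (pvGap S i) = Nat.find (pvGap S (i+1)) + 1 := by
  rw [Nat.find_eq_iff]
  constructor
  · rw [show (i + ((Nat.find (pvGap S (i+1)) + 1 : Nat) : Int))
        = (i+1) + (Nat.find (pvGap S (i+1)) : Int) by push_cast; ring]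
    exact Nat.find_spec (pvGap S (i+1))
  · intro m hm
    match m with
    | 0 => simpa using h
    | (m'+1) =>
      have h2 := Nat.find_min (pvGap S (i+1)) (show m' < Nat.find (pvGap S (i+1)) by omega)
      rw [show (i + ((m'+1 : Nat) : Int)) = (i+1) + (m' : Int) by push_cast; ring]
      exact h2

theorem pvLeast_of_mem (S : List Int) (i : Int) (h : i ∈ S) : pvLeast S i = pvLeast S (i+1) := by
  unfold pvLeast
  rw [pvFind_of_mem S i h]
  push_cast
  ring

theorem pvLeast_mem_of_lt (S : List Int) (i t : Int) (h1 : i ≤ t) (h2 : t < pvLeast S i) :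
    t ∈ S := by
  unfold pvLeast at h2
  have hj : ((t - i).toNat : Int) = t - i := Int.toNat_of_nonneg (by omega)
  have hlt : (t - i).toNat < Nat.find (pvGap S i) := by omega
  have h3 := Nat.find_min (pvGap S i) hlt
  simp only [not_not] at h3
  rwa [show i + (((t-i).toNat : Nat) : Int) = t by omega] at h3

theorem pvMexAux_eq_least (S : List Int) (fuel : Nat) (i : Int)
    (h : Nat.find (pvGap S i) < fuel) : pvMexAux S fuel i = pvLeast S i := by
  induction fuel generalizing i with
  | zero => omega
  | succ f ih =>
    simp only [pvMexAux]
    by_cases hm : i ∈ S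
    · rw [if_pos hm, ih (i+1) (by have := pvFind_of_mem S i hm; omega)]
      exact (pvLeast_of_mem S i hm).symm
    · rw [if_neg hm]
      exact (pvLeast_of_not_mem S i hm).symm

theorem pvAdvance_eq_mexAux (S : List Int) (fuel : Nat) (i : Int) :
    pvAdvance S fuel i = pvMexAux S fuel i := by
  induction fuel generalizing i with
  | zero => rfl
  | succ f ih =>
    simp only [pvAdvance, pvMexAux]
    split_ifs with h
    · exact ih (i+1)
    · rfl

theorem pvMex_eq_least (S : List Int) : pvMex S = pvLeast S 0 := by
  unfold pvMex
  exact pvMexAux_eq_least S (S.length + 1) 0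
    (lt_of_le_of_lt (pvGap_bounded S 0) (Nat.lt_succ_self _))

-- skipping an initial segment contained in S does not change the least gap
theorem pvLeast_skip (S : List Int) (i i' : Int) (h1 : i ≤ i')
    (h2 : ∀ t : Int, i ≤ t → t < i' → t ∈ S) : pvLeast S i = pvLeast S i' := by
  have key : ∀ d : Nat, ∀ b : Int, (∀ t : Int, b ≤ t → t < b + d → t ∈ S) →
      pvLeast S b = pvLeast S (b + d) := by
    intro d
    induction d with
    | zero => intro b _; simp
    | succ d ih =>
      intro b hb
      have hbS : b ∈ S := hb b le_rfl (by push_cast; omega)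
      rw [pvLeast_of_mem S b hbS,
        show b + ((d+1 : Nat) : Int) = (b+1) + (d : Int) by push_cast; ring]
      exact ih (b+1) (fun t ht1 ht2 => hb t (by omega) (by push_cast; omega))
  have := key (i' - i).toNat i
  rw [show i + (((i' - i).toNat : Nat) : Int) = i' by omega] at this
  exact this (fun t ht1 ht2 => h2 t ht1 (by omega))

-- one incremental step of B equals the mex of the extended prefix
theorem pvAdvance_step (V : List Int) (x : Int) :
    pvAdvance (PySem.Set.add (PySem.Set.ofList V) x)
      ((PySem.Set.add (PySem.Set.ofList V) x).length + 1) (pvLeast V 0)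
    = pvLeast (V ++ [x]) 0 := by
  have hmem : ∀ y, y ∈ PySem.Set.add (PySem.Set.ofList V) x ↔ y ∈ V ++ [x] := by
    intro y
    rw [← PySem.Set.ofList_append_singleton, PySem.Set.mem_ofList]
  calc pvAdvance (PySem.Set.add (PySem.Set.ofList V) x)
        ((PySem.Set.add (PySem.Set.ofList V) x).length + 1) (pvLeast V 0)
      = pvMexAux (PySem.Set.add (PySem.Set.ofList V) x)
        ((PySem.Set.add (PySem.Set.ofList V) x).length + 1) (pvLeast V 0) :=
        pvAdvance_eq_mexAux _ _ _
    _ = pvLeast (PySem.Set.add (PySem.Set.ofList V) x) (pvLeast V 0) :=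
        pvMexAux_eq_least _ _ _
          (lt_of_le_of_lt (pvGap_bounded _ _) (Nat.lt_succ_self _))
    _ = pvLeast (V ++ [x]) (pvLeast V 0) := pvLeast_congr _ _ _ hmem
    _ = pvLeast (V ++ [x]) 0 :=
        (pvLeast_skip (V ++ [x]) 0 (pvLeast V 0) (pvLeast_nonneg V)
          (fun t ht1 ht2 => List.mem_append_left _ (pvLeast_mem_of_lt V 0 t ht1 ht2))).symm

-- the row invariant: B's fold state is (set of prefix values, its mex, A's row)
theorem pvFoldInv (g : List (List Int)) (i : Int) (c : Nat) :
    (PySem.List.pyRange 1 ((c : Int)+1) 1).foldl (pvStepB g i) (PySem.Set.empty, 0, [0])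
    = (PySem.Set.ofList ((PySem.List.pyRange 1 ((c : Int)+1) 1).map (fun k =>
         PySem.List.pyGetD (PySem.List.pyGetD g (i-k) []) (min (2*k) (i-k)) 0)),
       pvLeast ((PySem.List.pyRange 1 ((c : Int)+1) 1).map (fun k =>
         PySem.List.pyGetD (PySem.List.pyGetD g (i-k) []) (min (2*k) (i-k)) 0)) 0,
       (PySem.List.pyRange 1 ((c : Int)+1) 1).foldl (fun row j =>
         row ++ [pvMex ((PySem.List.pyRange 1 (j+1) 1).map (fun k =>
           PySem.List.pyGetD (PySem.List.pyGetD g (i-k) []) (min (2*k) (i-k)) 0))]) [0]) := by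
  induction c with
  | zero =>
    have h0 : PySem.List.pyRange 1 (((0:Nat) : Int)+1) 1 = [] :=
      PySem.List.pyRange_one_eq_nil (by norm_num)
    rw [h0]
    simp only [List.foldl_nil, List.map_nil]
    rw [pvLeast_of_not_mem [] 0 (by simp)]
    rfl
  | succ c ih =>
    have hsplit' : PySem.List.pyRange 1 ((c : Int)+1+1) 1
        = PySem.List.pyRange 1 ((c : Int)+1) 1 ++ [(c : Int)+1] :=
      PySem.List.pyRange_one_succ_right (by omega)
    rw [show (((c+1 : Nat)) : Int) + 1 = ((c : Int)+1)+1 by push_cast; ring,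
      hsplit', List.foldl_append, List.foldl_append, List.map_append, ih]
    simp only [List.foldl_cons, List.foldl_nil, List.map_cons, List.map_nil, pvStepB]
    rw [hsplit']
    simp only [List.map_append, List.map_cons, List.map_nil, Prod.mk.injEq]
    refine ⟨(PySem.Set.ofList_append_singleton _ _).symm, pvAdvance_step _ _, ?_⟩
    rw [pvAdvance_step, pvMex_eq_least]

theorem pvRow_eq (g : List (List Int)) (i : Int) : pvRowA g i = pvRowB g i := by
  unfold pvRowA pvRowB
  by_cases hi : i + 1 ≤ 1
  · rw [PySem.List.pyRange_one_eq_nil hi]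
    rfl
  · obtain ⟨c, rfl⟩ : ∃ c : Nat, i = (c : Int) := ⟨i.toNat, by omega⟩
    rw [pvFoldInv g (c : Int) c]

-- ===== VERDICT (by name: the statement is the Claim_ definition above) =====
theorem fibnim_spec : Claim_equal_fibnim := by
  intro n _
  unfold Spec_fibnim fibnim fibnim_alt
  have h : (fun (g : List (List Int)) (i : Int) => g ++ [pvRowA g i])
      = (fun g i => g ++ [pvRowB g i]) := by
    funext g i
    rw [pvRow_eq]
  rw [h]
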